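-- pv_equiv track=rewrite | github.com/vntick05/stormsurge | services/pws-structuring-service/canonical_artifacts.py | summarize_provenance_pages
-- ===== SOURCE A (Python) =====
-- from typing import Any
--
-- def summarize_provenance_pages(blocks: list[dict[str, Any]]) -> list[int]:
--     pages = {
--         int(source["page_start"])
--         for block in blocks
--         for source in [block.get("source") or {}]
--         if source.get("page_start") is not None
--     }
--     return sorted(pages)
-- ===== SOURCE B (Python) =====
-- def summarize_provenance_pages(blocks: list[dict[str, any]]) -> list[int]:
--     out: list[int] = []
--     for block in blocks:
--         source = block.get("source") or {}
--         p = source.get("page_start")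
--         if p is None:
--             continue
--         v = int(p)
--         i = 0
--         while i < len(out) and out[i] < v:
--             i += 1
--         if i == len(out) or out[i] != v:
--             out.insert(i, v)
--     return out
-- ===== Notes on version B (the rewrite author's own statement) =====
-- stated objective: alternative
-- what changed: Replaces A's set-comprehension-then-sorted() with a single pass that maintains a sorted duplicate-free result list by linear ordered insertion (no set, no sort call).
import Mathlib
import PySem

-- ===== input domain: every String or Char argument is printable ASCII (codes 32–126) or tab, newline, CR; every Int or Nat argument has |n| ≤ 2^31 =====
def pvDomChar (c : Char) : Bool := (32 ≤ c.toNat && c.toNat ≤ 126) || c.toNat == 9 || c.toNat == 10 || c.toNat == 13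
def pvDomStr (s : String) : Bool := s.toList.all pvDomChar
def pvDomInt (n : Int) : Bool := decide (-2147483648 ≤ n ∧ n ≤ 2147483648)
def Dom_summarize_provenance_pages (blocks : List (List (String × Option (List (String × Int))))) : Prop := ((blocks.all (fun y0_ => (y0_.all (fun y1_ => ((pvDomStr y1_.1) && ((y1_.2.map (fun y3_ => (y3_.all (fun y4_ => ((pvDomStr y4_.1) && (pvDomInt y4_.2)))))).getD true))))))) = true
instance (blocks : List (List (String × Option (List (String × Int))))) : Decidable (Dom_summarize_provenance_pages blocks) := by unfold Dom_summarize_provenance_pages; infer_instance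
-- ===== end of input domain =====

-- B replaces A's set-comprehension-then-sorted() by one pass keeping a sorted duplicate-free
-- list via ordered insertion (objective: alternative; no set, no sort call).

-- ===== PORT A =====
-- `block.get("source") or {}` then `source.get("page_start")`; int(p) is the identity on an Int value
def pvPage_A (block : List (String × Option (List (String × Int)))) : Option Int :=
  let source : List (String × Int) :=
    match PySem.Dict.get? (PySem.Dict.mk block) "source" with
    | some (some s) => s
    | _ => []          -- missing key, None value, or falsy {} all give {}
  PySem.Dict.get? (PySem.Dict.mk source) "page_start"

def summarize_provenance_pages (blocks : List (List (String × Option (List (String × Int))))) : List Int :=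
  let pages : PySem.Set Int :=
    PySem.Set.ofList (blocks.flatMap (fun block =>
      match pvPage_A block with
      | some p => [p]
      | none => []))
  PySem.List.sorted pages (fun x => x)

-- ===== PORT B =====
-- Source B's while-scan + conditional `out.insert(i, v)`: walk the sorted list to the first
-- element ≥ v, insert v there unless it is already present
def pvInsOrd (v : Int) : List Int → List Int
  | [] => [v]
  | x :: t => if x < v then x :: pvInsOrd v t else if x = v then x :: t else v :: x :: t

-- Source B's for-loop as structural recursion over the blocks, threading `out`
def pvGoB (bs : List (List (String × Option (List (String × Int))))) (out : List Int) : List Int :=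
  match bs with
  | [] => out
  | b :: rest =>
    let source : List (String × Int) :=
      (((PySem.Dict.get? (PySem.Dict.mk b) "source")).bind (fun o => o)).getD []
    match PySem.Dict.get? (PySem.Dict.mk source) "page_start" with
    | none => pvGoB rest out
    | some v => pvGoB rest (pvInsOrd v out)

def summarize_provenance_pages_alt (blocks : List (List (String × Option (List (String × Int))))) : List Int :=
  pvGoB blocks []

-- ===== PRECONDITION & SPEC =====
def Spec_summarize_provenance_pages (blocks : List (List (String × Option (List (String × Int))))) (out : List Int) : Prop := out = summarize_provenance_pages_alt blocks
instance (blocks : List (List (String × Option (List (String × Int))))) (out : List Int) : Decidable (Spec_summarize_provenance_pages blocks out) := by unfold Spec_summarize_provenance_pages; infer_instance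

-- ===== CLAIM (what is proved, stated in full; the proofs are below) =====
def Claim_equal_summarize_provenance_pages : Prop := ∀ (blocks : List (List (String × Option (List (String × Int))))), Dom_summarize_provenance_pages blocks → Spec_summarize_provenance_pages blocks (summarize_provenance_pages blocks)

-- ===== LEMMAS AND PROOFS =====

-- B's inlined extraction computes the same optional page as A's helper
theorem pvPage_eq (b : List (String × Option (List (String × Int)))) :
    PySem.Dict.get? (PySem.Dict.mk ((((PySem.Dict.get? (PySem.Dict.mk b) "source")).bind (fun o => o)).getD [])) "page_start"
    = pvPage_A b := by
  unfold pvPage_A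
  rcases h : PySem.Dict.get? (PySem.Dict.mk b) "source" with _ | (_ | s) <;> simp

theorem pvMem_insOrd (v x : Int) (l : List Int) :
    x ∈ pvInsOrd v l ↔ x = v ∨ x ∈ l := by
  induction l with
  | nil => simp [pvInsOrd]
  | cons y t ih =>
    simp only [pvInsOrd]
    split_ifs with h1 h2
    · simp only [List.mem_cons, ih]; tauto
    · subst h2; simp only [List.mem_cons]; tauto
    · simp only [List.mem_cons]

theorem pvPairwise_insOrd (v : Int) (l : List Int) (h : l.Pairwise (· < ·)) :
    (pvInsOrd v l).Pairwise (· < ·) := by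
  induction l with
  | nil => simp [pvInsOrd]
  | cons y t ih =>
    rcases List.pairwise_cons.mp h with ⟨hy, ht⟩
    simp only [pvInsOrd]
    split_ifs with h1 h2
    · refine List.pairwise_cons.mpr ⟨?_, ih ht⟩
      intro z hz
      rcases (pvMem_insOrd v z t).mp hz with rfl | hz'
      · exact h1
      · exact hy z hz'
    · subst h2; exact h
    · have hvy : v < y := lt_of_le_of_ne (not_lt.mp h1) (fun e => h2 e.symm)
      refine List.pairwise_cons.mpr ⟨?_, h⟩
      intro z hz
      rcases List.mem_cons.mp hz with rfl | hz'
      · exact hvy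
      · exact lt_trans hvy (hy z hz')

-- the pages A's comprehension collects (duplicates kept, block order)
def pvPagesOf (bs : List (List (String × Option (List (String × Int))))) : List Int :=
  bs.flatMap (fun block =>
    match pvPage_A block with
    | some p => [p]
    | none => [])

-- loop invariant: pvGoB keeps `out` strictly sorted and its members are out ∪ pages
theorem pvGoB_inv (bs : List (List (String × Option (List (String × Int))))) (out : List Int)
    (h : out.Pairwise (· < ·)) :
    (pvGoB bs out).Pairwise (· < ·) ∧ ∀ x, (x ∈ pvGoB bs out ↔ x ∈ out ∨ x ∈ pvPagesOf bs) := by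
  induction bs generalizing out with
  | nil => simpa [pvGoB, pvPagesOf]
  | cons b rest ih =>
    simp only [pvGoB, pvPage_eq]
    rcases hp : pvPage_A b with _ | v
    · have := ih out h
      simpa [pvPagesOf, hp] using this
    · have := ih (pvInsOrd v out) (pvPairwise_insOrd v out h)
      refine ⟨this.1, fun x => ?_⟩
      rw [this.2 x, pvMem_insOrd]
      simp [pvPagesOf, hp]
      tauto

-- ===== VERDICT (by name: the statement is the Claim_ definition above) =====
theorem summarize_provenance_pages_spec : Claim_equal_summarize_provenance_pages := by
  intro blocks _
  unfold Spec_summarize_provenance_pages summarize_provenance_pages summarize_provenance_pages_alt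
  obtain ⟨hpw, hmem⟩ := pvGoB_inv blocks [] (List.Pairwise.nil)
  apply PySem.List.sorted_eq_of_perm_of_pairwise_lt
  · rw [List.perm_ext_iff_of_nodup (hpw.imp (fun h => ne_of_lt h)) (PySem.Set.nodup_ofList _)]
    intro x
    rw [hmem x, PySem.Set.mem_ofList]
    simp [pvPagesOf]
  · exact hpw
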